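-- pv_equiv track=rewrite | github.com/atheiste/LiU-TextMining | Lab5/Lab5-2.py | has_bigrams_feats
-- ===== SOURCE A (Python) =====
-- def has_bigrams_feats(document, bigr):
--     '''Produces binary features "has('word1','word2'): <true|false>" '''
--     features = {}
--     for b in bigr:
--         found = False
--         for i in range(1,len(document)):
--             if ((document[i-1],document[i]) == b):
--                 found = True
--                 break
--         features['has(%s)' % str(b)] = found
--     return features
-- ===== SOURCE B (Python) =====
-- def has_bigrams_feats(document, bigr):
--     '''Produces binary features "has('word1','word2'): <true|false>" '''
--     pairs = {(document[i - 1], document[i]) for i in range(1, len(document))}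
--     features = {}
--     for b in bigr:
--         features['has(%s)' % str(b)] = b in pairs
--     return features
-- ===== Notes on version B (the rewrite author's own statement) =====
-- stated objective: faster
-- what changed: B makes one pass over the document building a set of its consecutive word pairs, then answers each bigram query by a set lookup, instead of A's linear rescan of the whole document for every bigram.
import Mathlib
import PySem

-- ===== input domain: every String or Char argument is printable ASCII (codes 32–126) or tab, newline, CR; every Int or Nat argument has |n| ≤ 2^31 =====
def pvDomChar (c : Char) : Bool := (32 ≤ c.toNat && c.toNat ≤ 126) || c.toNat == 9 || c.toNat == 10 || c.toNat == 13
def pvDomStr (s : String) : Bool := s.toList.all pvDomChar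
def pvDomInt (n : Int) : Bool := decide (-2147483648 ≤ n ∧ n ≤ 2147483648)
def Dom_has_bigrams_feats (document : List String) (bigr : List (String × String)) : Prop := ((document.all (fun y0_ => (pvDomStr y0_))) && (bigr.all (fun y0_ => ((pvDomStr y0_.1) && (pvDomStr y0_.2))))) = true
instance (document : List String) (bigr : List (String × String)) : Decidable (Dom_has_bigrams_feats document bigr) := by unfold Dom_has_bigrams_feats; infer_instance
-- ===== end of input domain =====

-- B replaces A's per-bigram rescan of the document by one document pass that
-- builds the set of consecutive word pairs, each query becoming a set lookup (faster).

-- Shared helper: Python's  'has(%s)' % str(b)  for a 2-tuple of strings.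
-- repr of an ASCII string: single quotes, unless the string contains ' and no ",
-- then double quotes; backslash, the quote character, tab, newline, CR are escaped.
def pvReprStr (s : String) : String :=
  let cs := s.toList
  let q : Char := if cs.contains '\'' && !(cs.contains '"') then '"' else '\''
  String.ofList (q :: cs.flatMap (fun c =>
    if c = '\\' then ['\\', '\\']
    else if c = q then ['\\', q]
    else if c = '\t' then ['\\', 't']
    else if c = '\n' then ['\\', 'n']
    else if c = '\r' then ['\\', 'r']
    else [c]) ++ [q])

def pvKey (b : String × String) : String :=
  "has((" ++ pvReprStr b.1 ++ ", " ++ pvReprStr b.2 ++ "))"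

-- ===== PORT A =====
-- inner loop of A: for i in range(1,len(document)): if (document[i-1],document[i])==b: found=True; break
-- every i produced by range(1, len(document)) has both i-1 and i in range, so pyGetD is exact here
def pvFindLoop (document : List String) (b : String × String) : List Int → Bool
  | [] => false
  | i :: rest =>
      if (PySem.List.pyGetD document (i - 1) "", PySem.List.pyGetD document i "") = b then true
      else pvFindLoop document b rest

def has_bigrams_feats (document : List String) (bigr : List (String × String)) : List (String × Bool) :=
  (bigr.foldl
    (fun features b =>
      features.insert (pvKey b) (pvFindLoop document b (PySem.List.pyRange 1 (document.length : Int) 1)))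
    PySem.Dict.empty).items

-- ===== PORT B =====
def has_bigrams_feats_alt (document : List String) (bigr : List (String × String)) : List (String × Bool) :=
  let pairs : PySem.Set (String × String) :=
    PySem.Set.ofList ((PySem.List.pyRange 1 (document.length : Int) 1).map
      (fun i => (PySem.List.pyGetD document (i - 1) "", PySem.List.pyGetD document i "")))
  (bigr.foldl
    (fun features b => features.insert (pvKey b) (pairs.contains b))
    PySem.Dict.empty).items

-- ===== PRECONDITION & SPEC =====
def Spec_has_bigrams_feats (document : List String) (bigr : List (String × String)) (out : List (String × Bool)) : Prop := out = has_bigrams_feats_alt document bigr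
instance (document : List String) (bigr : List (String × String)) (out : List (String × Bool)) : Decidable (Spec_has_bigrams_feats document bigr out) := by unfold Spec_has_bigrams_feats; infer_instance

-- ===== CLAIM (what is proved, stated in full; the proofs are below) =====
def Claim_equal_has_bigrams_feats : Prop := ∀ (document : List String) (bigr : List (String × String)), Dom_has_bigrams_feats document bigr → Spec_has_bigrams_feats document bigr (has_bigrams_feats document bigr)

-- ===== LEMMAS AND PROOFS =====

-- A's scan-with-break over a list of indices is membership of b in the mapped pair list
theorem pvFindLoop_eq_mem (document : List String) (b : String × String) (is : List Int) :
    pvFindLoop document b is =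
      decide (b ∈ is.map (fun i => (PySem.List.pyGetD document (i - 1) "", PySem.List.pyGetD document i ""))) := by
  induction is with
  | nil => simp [pvFindLoop]
  | cons i rest ih =>
      simp only [pvFindLoop, List.map_cons, List.mem_cons, ih]
      by_cases h : (PySem.List.pyGetD document (i - 1) "", PySem.List.pyGetD document i "") = b
      · simp [h, eq_comm]
      · simp only [h, if_false, decide_eq_decide]
        constructor
        · exact Or.inr
        · rintro (hb | hb)
          · exact absurd hb.symm h
          · exact hb

-- hence A's per-bigram value equals B's set lookup
theorem pvVal_eq (document : List String) (b : String × String) :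
    pvFindLoop document b (PySem.List.pyRange 1 (document.length : Int) 1) =
      PySem.Set.contains
        (PySem.Set.ofList ((PySem.List.pyRange 1 (document.length : Int) 1).map
          (fun i => (PySem.List.pyGetD document (i - 1) "", PySem.List.pyGetD document i "")))) b := by
  rw [pvFindLoop_eq_mem]
  simp [pysem]

-- ===== VERDICT (by name: the statement is the Claim_ definition above) =====
theorem has_bigrams_feats_spec : Claim_equal_has_bigrams_feats := by
  intro document bigr _
  unfold Spec_has_bigrams_feats has_bigrams_feats has_bigrams_feats_alt
  have h : (fun (features : PySem.Dict String Bool) (b : String × String) =>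
      features.insert (pvKey b) (pvFindLoop document b (PySem.List.pyRange 1 (document.length : Int) 1)))
    = (fun (features : PySem.Dict String Bool) (b : String × String) =>
      features.insert (pvKey b)
        (PySem.Set.contains
          (PySem.Set.ofList ((PySem.List.pyRange 1 (document.length : Int) 1).map
            (fun i => (PySem.List.pyGetD document (i - 1) "", PySem.List.pyGetD document i "")))) b)) := by
    funext features b
    rw [pvVal_eq]
  rw [h]
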